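-- pv_equiv track=rewrite | github.com/KevinZhou92/Lintcode-Python | 132_word-search-2/word-search-2.py | get_prefix_map
-- ===== SOURCE A (Python) =====
-- def get_prefix_map(words):
--     prefix_map = {}
--
--     for word in words:
--         for i in range(len(word)):
--             prefix = word[:i + 1]
--             if prefix not in prefix_map:
--                 prefix_map[prefix] = False
--         prefix_map[word] = True
--
--     return prefix_map
-- ===== SOURCE B (Python) =====
-- def get_prefix_map(words):
--     # Phase 1: one pass to index the words; phase 2: emit the key stream
--     # (all non-empty prefixes of each word, then the word itself) and
--     # dedup it once, assigning each key its word-ness by direct lookup.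
--     word_set = set(words)
--     keys = []
--     for word in words:
--         for i in range(1, len(word) + 1):
--             keys.append(word[:i])
--         keys.append(word)
--     prefix_map = {}
--     for k in keys:
--         if k not in prefix_map:
--             prefix_map[k] = k in word_set
--     return prefix_map
-- ===== Notes on version B (the rewrite author's own statement) =====
-- stated objective: alternative
-- what changed: A marks every new prefix False and later overwrites full words with True; B first builds a set index of the words, then generates the whole prefix/word key stream, dedups it in a single pass, and assigns each key its flag directly by membership lookup — no overwriting ever happens.
import Mathlib
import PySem

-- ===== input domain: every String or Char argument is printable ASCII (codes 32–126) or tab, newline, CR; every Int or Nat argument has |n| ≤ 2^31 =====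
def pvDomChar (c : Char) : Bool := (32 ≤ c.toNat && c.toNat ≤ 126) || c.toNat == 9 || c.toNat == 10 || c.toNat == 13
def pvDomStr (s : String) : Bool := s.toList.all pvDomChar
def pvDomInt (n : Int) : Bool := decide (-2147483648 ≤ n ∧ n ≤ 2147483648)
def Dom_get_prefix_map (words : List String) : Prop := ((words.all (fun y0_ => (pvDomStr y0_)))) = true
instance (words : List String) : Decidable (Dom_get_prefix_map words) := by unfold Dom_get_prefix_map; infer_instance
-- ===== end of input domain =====

-- B replaces A's mark-prefix-False-then-overwrite-word-True scheme by a set index of the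
-- words plus a single dedup pass over the generated key stream, assigning each key its
-- flag once by membership lookup (objective: alternative, same asymptotic cost).

-- ===== PORT A =====
def get_prefix_map (words : List String) : List (String × Bool) :=
  (words.foldl (fun prefix_map word =>
      ((PySem.List.pyRange 0 (PySem.Str.len word) 1).foldl
          (fun prefix_map i =>
            let pfx := PySem.Str.slice word none (some (i + 1))
            if prefix_map.contains pfx then prefix_map else prefix_map.insert pfx false)
          prefix_map).insert word true)
    PySem.Dict.empty).items

-- ===== PORT B =====
def get_prefix_map_alt (words : List String) : List (String × Bool) :=
  let word_set : PySem.Set String := PySem.Set.ofList words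
  let keys : List String := words.foldl (fun ks word =>
      ((PySem.List.pyRange 1 (PySem.Str.len word + 1) 1).foldl
          (fun ks i => ks ++ [PySem.Str.slice word none (some i)]) ks) ++ [word]) []
  (keys.foldl (fun d k => if d.contains k then d else d.insert k (word_set.contains k))
    PySem.Dict.empty).items

-- ===== PRECONDITION & SPEC =====
def Spec_get_prefix_map (words : List String) (out : List (String × Bool)) : Prop := out = get_prefix_map_alt words
instance (words : List String) (out : List (String × Bool)) : Decidable (Spec_get_prefix_map words out) := by unfold Spec_get_prefix_map; infer_instance

-- ===== CLAIM (what is proved, stated in full; the proofs are below) =====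
def Claim_equal_get_prefix_map : Prop := ∀ (words : List String), Dom_get_prefix_map words → Spec_get_prefix_map words (get_prefix_map words)

-- ===== LEMMAS AND PROOFS =====

-- A's per-word key stream: the non-empty prefixes word[:i+1], i = 0 .. len-1
def pvPrefs (w : String) : List String :=
  (PySem.List.pyRange 0 (PySem.Str.len w) 1).map (fun i => PySem.Str.slice w none (some (i + 1)))

-- the full key stream both programs insert, in order
def pvStream (ws : List String) : List String := ws.flatMap (fun w => pvPrefs w ++ [w])

-- first-occurrence dedup of a stream relative to already-seen keys
def pvNK (seen : List String) : List String → List String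
  | [] => []
  | k :: L => if k ∈ seen then pvNK seen L else k :: pvNK (k :: seen) L

theorem mem_pvNK (seen L : List String) (x : String) :
    x ∈ pvNK seen L ↔ x ∈ L ∧ x ∉ seen := by
  induction L generalizing seen with
  | nil => simp [pvNK]
  | cons k L ih =>
    by_cases hk : k ∈ seen
    · rw [pvNK, if_pos hk, ih]
      constructor
      · rintro ⟨h1, h2⟩; exact ⟨List.mem_cons_of_mem _ h1, h2⟩
      · rintro ⟨h1, h2⟩
        rcases List.mem_cons.mp h1 with h | h
        · exact absurd (h ▸ hk) h2
        · exact ⟨h, h2⟩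
    · rw [pvNK, if_neg hk]
      simp only [List.mem_cons, ih, List.mem_cons]
      constructor
      · rintro (rfl | ⟨h1, h2⟩)
        · exact ⟨Or.inl rfl, hk⟩
        · exact ⟨Or.inr h1, fun c => h2 (Or.inr c)⟩
      · rintro ⟨rfl | h1, h2⟩
        · exact Or.inl rfl
        · by_cases hxk : x = k
          · exact Or.inl hxk
          · exact Or.inr ⟨h1, fun c => (c.elim hxk h2)⟩

theorem pvNK_congr (seen seen' L : List String) (h : ∀ x, x ∈ seen ↔ x ∈ seen') :
    pvNK seen L = pvNK seen' L := by
  induction L generalizing seen seen' with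
  | nil => rfl
  | cons k L ih =>
    by_cases hk : k ∈ seen
    · rw [pvNK, if_pos hk, pvNK, if_pos ((h k).mp hk)]
      exact ih _ _ h
    · rw [pvNK, if_neg hk, pvNK, if_neg (fun c => hk ((h k).mpr c))]
      exact congrArg (k :: ·) (ih _ _ (fun x => by simp [List.mem_cons, h x]))

theorem pvNK_append (seen L1 L2 : List String) :
    pvNK seen (L1 ++ L2) = pvNK seen L1 ++ pvNK (L1 ++ seen) L2 := by
  induction L1 generalizing seen with
  | nil => simp [pvNK]
  | cons k L1 ih =>
    by_cases hk : k ∈ seen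
    · rw [List.cons_append, pvNK, if_pos hk, pvNK, if_pos hk, ih]
      refine congrArg _ (pvNK_congr _ _ _ (fun x => ?_))
      simp only [List.mem_append, List.cons_append, List.mem_cons]
      constructor
      · rintro (h | h)
        · exact Or.inr (Or.inl h)
        · exact Or.inr (Or.inr h)
      · rintro (rfl | h | h)
        · exact Or.inr hk
        · exact Or.inl h
        · exact Or.inr h
    · rw [List.cons_append, pvNK, if_neg hk, pvNK, if_neg hk, ih, List.cons_append]
      refine congrArg (k :: ·) (congrArg _ (pvNK_congr _ _ _ (fun x => ?_)))
      simp only [List.mem_append, List.mem_cons, List.cons_append]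
      tauto

theorem pvDict_contains (d : PySem.Dict String Bool) (k : String) :
    d.contains k = decide (k ∈ d.items.map Prod.fst) := by
  by_cases h : k ∈ d.items.map Prod.fst
  · simp only [h, decide_true]
    rcases List.mem_map.mp h with ⟨p, hp, hk⟩
    exact List.any_eq_true.mpr ⟨p, hp, by simp [hk]⟩
  · simp only [h, decide_false]
    refine List.any_eq_false.mpr (fun p hp => ?_)
    simp only [beq_iff_eq]
    exact fun c => h (List.mem_map.mpr ⟨p, hp, c⟩)

theorem pvDict_insert_new (d : PySem.Dict String Bool) (k : String) (v : Bool)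
    (h : k ∉ d.items.map Prod.fst) :
    d.insert k v = PySem.Dict.mk (d.items ++ [(k, v)]) := by
  rw [PySem.Dict.insert, if_neg (by rw [pvDict_contains]; simp [h])]

theorem pvDict_insert_map (K : List String) (f : String → Bool) (w : String) (v : Bool) :
    (PySem.Dict.mk (K.map (fun k => (k, f k)))).insert w v
    = if w ∈ K then PySem.Dict.mk (K.map (fun k => (k, if k = w then v else f k)))
      else PySem.Dict.mk (K.map (fun k => (k, f k)) ++ [(w, v)]) := by
  have hfst : (PySem.Dict.mk (K.map (fun k => (k, f k)))).items.map Prod.fst = K := by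
    simp [List.map_map, Function.comp_def]
  by_cases hw : w ∈ K
  · rw [if_pos hw, PySem.Dict.insert, if_pos (by rw [pvDict_contains, hfst]; simp [hw])]
    refine congrArg PySem.Dict.mk ?_
    show (K.map (fun k => (k, f k))).map _ = _
    rw [List.map_map]
    refine List.map_congr_left (fun k _ => ?_)
    by_cases hkw : k = w
    · subst hkw; simp
    · simp [hkw, Function.comp]
  · rw [if_neg hw, pvDict_insert_new _ _ _ (by rw [hfst]; exact hw)]

-- the shared conditional-insert loop: build on top of d exactly the new keys, valued by g
theorem pvFold (g : String → Bool) (L : List String) (d : PySem.Dict String Bool) :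
    L.foldl (fun d k => if d.contains k then d else d.insert k (g k)) d
    = PySem.Dict.mk (d.items ++ (pvNK (d.items.map Prod.fst) L).map (fun k => (k, g k))) := by
  induction L generalizing d with
  | nil => simp [pvNK]
  | cons k L ih =>
    rw [List.foldl_cons]
    by_cases hk : k ∈ d.items.map Prod.fst
    · rw [if_pos (by rw [pvDict_contains]; simp [hk]), ih, pvNK, if_pos hk]
    · rw [if_neg (by rw [pvDict_contains]; simp [hk]),
        pvDict_insert_new _ _ _ hk, ih, pvNK, if_neg hk]
      simp only [List.map_append, List.map_cons, List.map_nil]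
      rw [pvNK_congr ((d.items.map Prod.fst) ++ [k]) (k :: d.items.map Prod.fst) L
        (fun x => by simp [List.mem_append, List.mem_cons, or_comm])]
      simp [List.append_assoc]

theorem pvMem_stream (w : String) (ws : List String) (h : w ∈ ws) : w ∈ pvStream ws := by
  simp only [pvStream, List.mem_flatMap]
  exact ⟨w, h, by simp⟩

-- A's outer loop, characterised: keys are the first-occurrence dedup of the stream,
-- values are membership in the words processed so far
theorem pvFoldA (ws done : List String) :
    ws.foldl (fun prefix_map word =>
        ((PySem.List.pyRange 0 (PySem.Str.len word) 1).foldl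
            (fun prefix_map i =>
              let pfx := PySem.Str.slice word none (some (i + 1))
              if prefix_map.contains pfx then prefix_map else prefix_map.insert pfx false)
            prefix_map).insert word true)
      (PySem.Dict.mk ((pvNK [] (pvStream done)).map (fun k => (k, decide (k ∈ done)))))
    = PySem.Dict.mk ((pvNK [] (pvStream (done ++ ws))).map (fun k => (k, decide (k ∈ done ++ ws)))) := by
  induction ws generalizing done with
  | nil => simp
  | cons w ws ih =>
    rw [List.foldl_cons]
    have hstep :
        ((PySem.List.pyRange 0 (PySem.Str.len w) 1).foldl
            (fun prefix_map i =>
              let pfx := PySem.Str.slice w none (some (i + 1))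
              if prefix_map.contains pfx then prefix_map else prefix_map.insert pfx false)
            (PySem.Dict.mk ((pvNK [] (pvStream done)).map (fun k => (k, decide (k ∈ done)))))).insert w true
        = PySem.Dict.mk ((pvNK [] (pvStream (done ++ [w]))).map
            (fun k => (k, decide (k ∈ done ++ [w])))) := by
      have h1 :
          (PySem.List.pyRange 0 (PySem.Str.len w) 1).foldl
            (fun prefix_map i =>
              let pfx := PySem.Str.slice w none (some (i + 1))
              if prefix_map.contains pfx then prefix_map else prefix_map.insert pfx false)
            (PySem.Dict.mk ((pvNK [] (pvStream done)).map (fun k => (k, decide (k ∈ done)))))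
          = (pvPrefs w).foldl (fun pm k => if pm.contains k then pm else pm.insert k false)
            (PySem.Dict.mk ((pvNK [] (pvStream done)).map (fun k => (k, decide (k ∈ done))))) := by
        rw [pvPrefs, List.foldl_map]
      rw [h1, pvFold (fun _ => false)]
      have hK : ((PySem.Dict.mk ((pvNK [] (pvStream done)).map
          (fun k => (k, decide (k ∈ done))))).items).map Prod.fst = pvNK [] (pvStream done) := by
        simp [List.map_map, Function.comp_def]
      rw [hK]
      have hdoneK : ∀ x ∈ done, x ∈ pvNK [] (pvStream done) := fun x hx =>
        (mem_pvNK _ _ _).mpr ⟨pvMem_stream x done hx, by simp⟩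
      have hNfalse :
          (pvNK (pvNK [] (pvStream done)) (pvPrefs w)).map (fun k => (k, false))
          = (pvNK (pvNK [] (pvStream done)) (pvPrefs w)).map
              (fun k => (k, decide (k ∈ done))) := by
        refine List.map_congr_left (fun k hk => ?_)
        have h2 := (mem_pvNK _ _ _).mp hk
        have h3 : k ∉ done := fun c => h2.2 (hdoneK k c)
        simp [h3]
      have hitems : (PySem.Dict.mk ((pvNK [] (pvStream done)).map
          (fun k => (k, decide (k ∈ done))))).items = (pvNK [] (pvStream done)).map
          (fun k => (k, decide (k ∈ done))) := rfl
      rw [hitems, hNfalse, ← List.map_append]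
      rw [pvDict_insert_map (pvNK [] (pvStream done) ++ pvNK (pvNK [] (pvStream done)) (pvPrefs w))
        (fun k => decide (k ∈ done)) w true]
      have hSK : ∀ x, x ∈ pvStream done ↔ x ∈ pvNK [] (pvStream done) := fun x => by
        rw [mem_pvNK]; simp
      have hwmem : w ∈ pvPrefs w ++ pvStream done ↔
          w ∈ pvNK [] (pvStream done) ++ pvNK (pvNK [] (pvStream done)) (pvPrefs w) := by
        simp only [List.mem_append, mem_pvNK, List.not_mem_nil, not_false_iff, and_true]
        tauto
      have hKeys : pvNK [] (pvStream (done ++ [w]))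
          = if w ∈ pvNK [] (pvStream done) ++ pvNK (pvNK [] (pvStream done)) (pvPrefs w)
            then pvNK [] (pvStream done) ++ pvNK (pvNK [] (pvStream done)) (pvPrefs w)
            else (pvNK [] (pvStream done) ++ pvNK (pvNK [] (pvStream done)) (pvPrefs w)) ++ [w] := by
        have hs : pvStream (done ++ [w]) = pvStream done ++ (pvPrefs w ++ [w]) := by
          simp [pvStream]
        rw [hs, pvNK_append, List.append_nil, pvNK_append]
        rw [pvNK_congr (pvStream done) (pvNK [] (pvStream done)) (pvPrefs w)
          (fun x => hSK x)]
        have hsingle : pvNK (pvPrefs w ++ pvStream done) [w]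
            = if w ∈ pvPrefs w ++ pvStream done then [] else [w] := by
          by_cases h : w ∈ pvPrefs w ++ pvStream done <;> simp [pvNK, h]
        rw [hsingle]
        by_cases h : w ∈ pvPrefs w ++ pvStream done
        · rw [if_pos h, if_pos (hwmem.mp h)]
          rw [List.append_nil]
        · rw [if_neg h, if_neg (fun c => h (hwmem.mpr c))]
          simp [List.append_assoc]
      rw [hKeys]
      by_cases hw : w ∈ pvNK [] (pvStream done) ++ pvNK (pvNK [] (pvStream done)) (pvPrefs w)
      · rw [if_pos hw, if_pos hw]
        refine congrArg PySem.Dict.mk ?_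
        refine List.map_congr_left (fun k _ => ?_)
        by_cases hkw : k = w
        · subst hkw; simp
        · simp [hkw]
      · rw [if_neg hw, if_neg hw]
        refine congrArg PySem.Dict.mk ?_
        have hmap : ∀ (g : String → String × Bool) (l : List String),
            (l ++ [w]).map g = l.map g ++ [g w] := fun g l => by simp
        rw [hmap]
        refine congrArg₂ (· ++ ·) ?_ (by simp)
        refine List.map_congr_left (fun k hk => ?_)
        have hkw : k ≠ w := fun c => hw (c ▸ hk)
        simp [hkw]
    rw [hstep, ih (done ++ [w])]
    simp [List.append_assoc]

theorem pvCharA (words : List String) :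
    get_prefix_map words = (pvNK [] (pvStream words)).map (fun k => (k, decide (k ∈ words))) := by
  have h := pvFoldA words []
  simp only [List.nil_append] at h
  unfold get_prefix_map
  have he : (PySem.Dict.empty : PySem.Dict String Bool)
      = PySem.Dict.mk ((pvNK [] (pvStream [])).map
          (fun k => (k, decide (k ∈ ([] : List String))))) := rfl
  rw [he, h]
  rfl

theorem pvPrefsB_eq (w : String) :
    (PySem.List.pyRange 1 (PySem.Str.len w + 1) 1).map (fun i => PySem.Str.slice w none (some i))
    = pvPrefs w := by
  rw [pvPrefs, PySem.List.pyRange_one, PySem.List.pyRange_one]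
  simp only [List.map_map, add_sub_cancel_right, sub_zero]
  refine List.map_congr_left (fun k _ => ?_)
  simp only [Function.comp_apply, zero_add]
  rw [add_comm]

theorem pvKeysB (ws acc : List String) :
    ws.foldl (fun ks word =>
      ((PySem.List.pyRange 1 (PySem.Str.len word + 1) 1).foldl
          (fun ks i => ks ++ [PySem.Str.slice word none (some i)]) ks) ++ [word]) acc
    = acc ++ pvStream ws := by
  induction ws generalizing acc with
  | nil => simp [pvStream]
  | cons w ws ih =>
    rw [List.foldl_cons, PySem.List.foldl_append_singleton_eq_map, pvPrefsB_eq, ih]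
    simp [pvStream, List.append_assoc]

theorem pvCharB (words : List String) :
    get_prefix_map_alt words = (pvNK [] (pvStream words)).map (fun k => (k, decide (k ∈ words))) := by
  show ((words.foldl (fun ks word =>
      ((PySem.List.pyRange 1 (PySem.Str.len word + 1) 1).foldl
          (fun ks i => ks ++ [PySem.Str.slice word none (some i)]) ks) ++ [word]) []).foldl
      (fun d k => if d.contains k then d
        else d.insert k ((PySem.Set.ofList words).contains k)) PySem.Dict.empty).items = _
  rw [pvKeysB, List.nil_append, pvFold ((PySem.Set.ofList words).contains)]
  show ([] : List (String × Bool)) ++ _ = _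
  rw [List.nil_append]
  refine List.map_congr_left (fun k _ => ?_)
  have : (PySem.Set.ofList words).contains k = decide (k ∈ words) := by
    simp [pysem]
  rw [this]

-- ===== VERDICT (by name: the statement is the Claim_ definition above) =====
theorem get_prefix_map_spec : Claim_equal_get_prefix_map := by
  intro words _
  unfold Spec_get_prefix_map
  rw [pvCharA, pvCharB]
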